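-- pv_equiv track=rewrite | github.com/kingdeewang/DSAlign | align/text.py | get_token_interval
-- ===== SOURCE A (Python) =====
-- def get_token_interval(text, at):
--     start = len(text)
--     end = 0
--     for step in [-1, 1]:
--         pos = at
--         while 0 <= pos < len(text) and not text[pos].isspace():
--             if pos < start:
--                 start = pos
--             if pos > end:
--                 end = pos
--             pos += step
--     return (start, end+1) if start <= end else (at, at)
-- ===== SOURCE B (Python) =====
-- def get_token_interval(text, at):
--     s = None  # start of the current non-whitespace run, or None
--     for i, ch in enumerate(text):
--         if ch.isspace():
--             if s is not None:
--                 if s <= at < i: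
--                     return (s, i)
--                 s = None
--         else:
--             if s is None:
--                 s = i
--     if s is not None and s <= at < len(text):
--         return (s, len(text))
--     return (at, at)
-- ===== Notes on version B (the rewrite author's own statement) =====
-- stated objective: alternative
-- what changed: Replaces A's two-directional character-by-character expansion around 'at' (outward while-loops tracking min/max) with a single left-to-right tokenizing scan that closes each whitespace-delimited run and returns the first run containing 'at'.
-- intended difference: On empty text A returns (0, 1) (start is initialised to len(text)=0, end to 0, so start<=end holds vacuously and a bogus interval past the end is returned); B returns (at, at), the intended 'no token here' answer that A itself gives on every other tokenless position. — e.g. on get_token_interval("", 0): A returns (0, 1), B returns (0, 0)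
import Mathlib
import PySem

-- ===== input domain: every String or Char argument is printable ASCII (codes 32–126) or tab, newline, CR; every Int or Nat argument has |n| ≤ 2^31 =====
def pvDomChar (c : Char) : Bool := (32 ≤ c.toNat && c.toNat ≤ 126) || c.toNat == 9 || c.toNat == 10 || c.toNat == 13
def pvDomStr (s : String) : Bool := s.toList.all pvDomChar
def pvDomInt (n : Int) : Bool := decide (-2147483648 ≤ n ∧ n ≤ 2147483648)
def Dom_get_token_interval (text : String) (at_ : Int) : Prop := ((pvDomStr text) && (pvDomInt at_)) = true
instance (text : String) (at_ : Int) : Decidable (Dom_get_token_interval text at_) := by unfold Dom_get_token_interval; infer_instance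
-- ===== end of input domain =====

-- B replaces A's two-directional expansion around `at` with a single left-to-right tokenizing
-- scan returning the first whitespace-delimited run containing `at` (alternative decomposition).

-- ===== PORT A =====
-- the while loop: fuel = len+1 always suffices (pos moves monotonically through [0, len))
def gtiInner (cs : List Char) (step : Int) : Nat → Int → Int → Int → Int × Int
  | 0, _pos, start, end_ => (start, end_)
  | fuel + 1, pos, start, end_ =>
    if 0 ≤ pos ∧ pos < (cs.length : Int) ∧ PySem.Chars.isspace (cs.getD pos.toNat ' ') = false then
      gtiInner cs step fuel (pos + step)
        (if pos < start then pos else start)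
        (if pos > end_ then pos else end_)
    else (start, end_)

def get_token_interval (text : String) (at_ : Int) : Int × Int :=
  let cs := text.toList
  let p1 := gtiInner cs (-1) (cs.length + 1) at_ (cs.length : Int) 0
  let p2 := gtiInner cs 1 (cs.length + 1) at_ p1.1 p1.2
  if p2.1 ≤ p2.2 then (p2.1, p2.2 + 1) else (at_, at_)

-- ===== PORT B =====
-- the for loop over enumerate(text): i is the index of the head of the remaining list, s the
-- pending run start (None = no open run); the [] case is the code after the loop.
def gtiScan (at_ : Int) (n : Nat) : List Char → Nat → Option Nat → Int × Int
  | [], _i, s =>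
    match s with
    | some st => if (st : Int) ≤ at_ ∧ at_ < (n : Int) then ((st : Int), (n : Int)) else (at_, at_)
    | none => (at_, at_)
  | c :: rest, i, s =>
    if PySem.Chars.isspace c then
      match s with
      | some st =>
        if (st : Int) ≤ at_ ∧ at_ < (i : Int) then ((st : Int), (i : Int))
        else gtiScan at_ n rest (i + 1) none
      | none => gtiScan at_ n rest (i + 1) none
    else
      match s with
      | some st => gtiScan at_ n rest (i + 1) (some st)
      | none => gtiScan at_ n rest (i + 1) (some i)

def get_token_interval_alt (text : String) (at_ : Int) : Int × Int :=
  gtiScan at_ text.toList.length text.toList 0 none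

-- ===== PRECONDITION & SPEC =====
-- On empty text A returns (0, 1) (start=len=0, end=0, so start ≤ end holds vacuously and a bogus
-- interval past the end comes back); B returns (at_, at_), the intended 'no token here' answer
-- that A itself gives on every other tokenless position.
def D_get_token_interval (text : String) (at_ : Int) : Prop := text = ""
instance (text : String) (at_ : Int) : Decidable (D_get_token_interval text at_) := by
  unfold D_get_token_interval; infer_instance

def Spec_get_token_interval (text : String) (at_ : Int) (out : Int × Int) : Prop :=
  ¬ D_get_token_interval text at_ → out = get_token_interval_alt text at_
instance (text : String) (at_ : Int) (out : Int × Int) : Decidable (Spec_get_token_interval text at_ out) := by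
  unfold Spec_get_token_interval; infer_instance

def pvDiffWitness_get_token_interval : String × Int := ("", 0)
def pvDiffWitnessOut_get_token_interval : (Int × Int) × (Int × Int) := ((0, 1), (0, 0))

-- ===== CLAIM (what is proved, stated in full; the proofs are below) =====
def Claim_unchanged_get_token_interval : Prop := ∀ (text : String) (at_ : Int), Dom_get_token_interval text at_ → Spec_get_token_interval text at_ (get_token_interval text at_)
def Claim_changed_get_token_interval : Prop := Dom_get_token_interval (pvDiffWitness_get_token_interval.1) (pvDiffWitness_get_token_interval.2) ∧ D_get_token_interval (pvDiffWitness_get_token_interval.1) (pvDiffWitness_get_token_interval.2) ∧ get_token_interval (pvDiffWitness_get_token_interval.1) (pvDiffWitness_get_token_interval.2) = pvDiffWitnessOut_get_token_interval.1 ∧ get_token_interval_alt (pvDiffWitness_get_token_interval.1) (pvDiffWitness_get_token_interval.2) = pvDiffWitnessOut_get_token_interval.2 ∧ pvDiffWitnessOut_get_token_interval.1 ≠ pvDiffWitnessOut_get_token_interval.2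
def Claim_exact_get_token_interval : Prop := ∀ (text : String) (at_ : Int), Dom_get_token_interval text at_ → D_get_token_interval text at_ → get_token_interval text at_ ≠ get_token_interval_alt text at_

-- ===== LEMMAS AND PROOFS =====

-- abbreviation used only by the proofs: the whitespace test at index j
def gtiWs (cs : List Char) (j : Nat) : Bool := PySem.Chars.isspace (cs.getD j ' ')

theorem gti_getD_of_drop_cons {cs rest : List Char} {c : Char} {i : Nat}
    (h : cs.drop i = c :: rest) : cs.getD i ' ' = c := by
  have h0 : (cs.drop i)[0]? = some c := by rw [h]; rfl
  rw [List.getElem?_drop] at h0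
  simp only [Nat.add_zero] at h0
  simp [List.getD, h0]

theorem gti_drop_succ {cs rest : List Char} {c : Char} {i : Nat}
    (h : cs.drop i = c :: rest) : cs.drop (i + 1) = rest := by
  have : (cs.drop i).tail = cs.drop (i + 1) := List.tail_drop
  rw [h] at this
  simpa using this.symm

theorem gti_lt_of_drop_cons {cs rest : List Char} {c : Char} {i : Nat}
    (h : cs.drop i = c :: rest) : i < cs.length := by
  by_contra hn
  rw [List.drop_eq_nil_of_le (by omega)] at h
  exact absurd h (by simp)

-- existence of the run start left of a non-space position
theorem gti_runStart (cs : List Char) (t : Nat) (ht : gtiWs cs t = false) :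
    ∃ a, a ≤ t ∧ (∀ j, a ≤ j → j ≤ t → gtiWs cs j = false) ∧ (a = 0 ∨ gtiWs cs (a - 1) = true) := by
  induction t with
  | zero =>
    refine ⟨0, le_refl _, fun j h1 h2 => ?_, Or.inl rfl⟩
    have : j = 0 := by omega
    subst this; exact ht
  | succ t ih =>
    by_cases hw : gtiWs cs t = true
    · exact ⟨t + 1, le_refl _, fun j h1 h2 => by have : j = t + 1 := by omega
                                                 subst this; exact ht,
             Or.inr (by simpa using hw)⟩
    · obtain ⟨a, h1, h2, h3⟩ := ih (by simpa using hw)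
      exact ⟨a, by omega, fun j ha hj => by
        rcases Nat.lt_or_ge j (t + 1) with h | h
        · exact h2 j ha (by omega)
        · have : j = t + 1 := by omega
          subst this; exact ht, h3⟩

-- existence of the run end right of a non-space position
theorem gti_runEnd (cs : List Char) (t : Nat) (ht : gtiWs cs t = false) (htn : t < cs.length) :
    ∃ b, t < b ∧ b ≤ cs.length ∧ (∀ j, t ≤ j → j < b → gtiWs cs j = false) ∧
      (b = cs.length ∨ gtiWs cs b = true) := by
  have H : ∀ k t, cs.length - t ≤ k → gtiWs cs t = false → t < cs.length →
      ∃ b, t < b ∧ b ≤ cs.length ∧ (∀ j, t ≤ j → j < b → gtiWs cs j = false) ∧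
        (b = cs.length ∨ gtiWs cs b = true) := by
    intro k
    induction k with
    | zero => intro t hk _ htn; omega
    | succ k ih =>
      intro t hk ht htn
      by_cases h1 : t + 1 = cs.length
      · exact ⟨cs.length, by omega, le_refl _, fun j hj1 hj2 => by
          have : j = t := by omega
          subst this; exact ht, Or.inl rfl⟩
      · by_cases h2 : gtiWs cs (t + 1) = true
        · exact ⟨t + 1, by omega, by omega, fun j hj1 hj2 => by
            have : j = t := by omega
            subst this; exact ht, Or.inr h2⟩
        · obtain ⟨b, hb1, hb2, hb3, hb4⟩ := ih (t + 1) (by omega) (by simpa using h2) (by omega)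
          exact ⟨b, by omega, hb2, fun j hj1 hj2 => by
            rcases Nat.lt_or_ge j (t + 1) with h | h
            · have : j = t := by omega
              subst this; exact ht
            · exact hb3 j h hj2, hb4⟩
  exact H (cs.length - t) t (le_refl _) ht htn


-- ---- A-side: the while loop ----

theorem gtiInner_exit (cs : List Char) (step pos start end_ : Int) (f : Nat)
    (h : ¬(0 ≤ pos ∧ pos < (cs.length : Int) ∧ PySem.Chars.isspace (cs.getD pos.toNat ' ') = false)) :
    gtiInner cs step (f + 1) pos start end_ = (start, end_) := by
  simp only [gtiInner, if_neg h]

-- downward loop over the non-space block [a, t]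
theorem gtiInner_down (cs : List Char) (a t : Nat)
    (ha : a = 0 ∨ gtiWs cs (a - 1) = true) (htn : t < cs.length)
    (hns : ∀ j, a ≤ j → j ≤ t → gtiWs cs j = false) :
    ∀ d, ∀ start end_ : Int, ∀ fuel : Nat, a + d ≤ t → d + 2 ≤ fuel →
      gtiInner cs (-1) fuel ((a + d : Nat) : Int) start end_
        = (min start (a : Int), max end_ ((a + d : Nat) : Int)) := by
  intro d
  induction d with
  | zero =>
    intro start end_ fuel hd hfuel
    obtain ⟨f, rfl⟩ : ∃ f, fuel = f + 1 := ⟨fuel - 1, by omega⟩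
    simp only [Nat.add_zero]
    have hcond : 0 ≤ ((a : Nat) : Int) ∧ ((a : Nat) : Int) < (cs.length : Int) ∧
        PySem.Chars.isspace (cs.getD ((a : Nat) : Int).toNat ' ') = false := by
      refine ⟨by omega, by omega, ?_⟩
      rw [Int.toNat_natCast]; exact hns a (le_refl _) (by omega)
    rw [gtiInner, if_pos hcond]
    obtain ⟨f', rfl⟩ : ∃ f', f = f' + 1 := ⟨f - 1, by omega⟩
    rw [gtiInner_exit]
    · simp only [Prod.mk.injEq]
      constructor <;> (split_ifs <;> omega)
    · rcases ha with h0 | hws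
      · subst h0; intro ⟨h1, _⟩; omega
      · intro ⟨h1, h2, h3⟩
        have he : (((a : Nat) : Int) + -1).toNat = a - 1 := by omega
        rw [he] at h3
        rw [gtiWs] at hws
        rw [h3] at hws; cases hws
  | succ d ih =>
    intro start end_ fuel hd hfuel
    obtain ⟨f, rfl⟩ : ∃ f, fuel = f + 1 := ⟨fuel - 1, by omega⟩
    have hcond : 0 ≤ ((a + (d + 1) : Nat) : Int) ∧ ((a + (d + 1) : Nat) : Int) < (cs.length : Int) ∧
        PySem.Chars.isspace (cs.getD ((a + (d + 1) : Nat) : Int).toNat ' ') = false := by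
      refine ⟨by omega, by omega, ?_⟩
      rw [Int.toNat_natCast]; exact hns (a + (d + 1)) (by omega) (by omega)
    rw [gtiInner, if_pos hcond]
    have he : ((a + (d + 1) : Nat) : Int) + -1 = ((a + d : Nat) : Int) := by push_cast; ring
    rw [he, ih _ _ f (by omega) (by omega)]
    simp only [Prod.mk.injEq]
    constructor <;> (split_ifs <;> omega)

-- upward loop over the non-space block [t, b)
theorem gtiInner_up (cs : List Char) (t b : Nat)
    (hb : b = cs.length ∨ gtiWs cs b = true) (hbn : b ≤ cs.length)
    (hns : ∀ j, t ≤ j → j < b → gtiWs cs j = false) :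
    ∀ e, ∀ i : Nat, ∀ start end_ : Int, ∀ fuel : Nat, i + e + 1 = b → t ≤ i → b - i + 1 ≤ fuel →
      gtiInner cs 1 fuel ((i : Nat) : Int) start end_
        = (min start (i : Int), max end_ ((b : Int) - 1)) := by
  intro e
  induction e with
  | zero =>
    intro i start end_ fuel hi hti hfuel
    obtain ⟨f, rfl⟩ : ∃ f, fuel = f + 1 := ⟨fuel - 1, by omega⟩
    have hcond : 0 ≤ ((i : Nat) : Int) ∧ ((i : Nat) : Int) < (cs.length : Int) ∧
        PySem.Chars.isspace (cs.getD ((i : Nat) : Int).toNat ' ') = false := by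
      refine ⟨by omega, by omega, ?_⟩
      rw [Int.toNat_natCast]; exact hns i hti (by omega)
    rw [gtiInner, if_pos hcond]
    obtain ⟨f', rfl⟩ : ∃ f', f = f' + 1 := ⟨f - 1, by omega⟩
    rw [gtiInner_exit]
    · simp only [Prod.mk.injEq]
      constructor <;> (split_ifs <;> omega)
    · rcases hb with h0 | hws
      · intro ⟨_, h2, _⟩; omega
      · intro ⟨h1, h2, h3⟩
        have he : (((i : Nat) : Int) + 1).toNat = b := by omega
        rw [he] at h3
        rw [gtiWs] at hws
        rw [h3] at hws; cases hws
  | succ e ih =>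
    intro i start end_ fuel hi hti hfuel
    obtain ⟨f, rfl⟩ : ∃ f, fuel = f + 1 := ⟨fuel - 1, by omega⟩
    have hcond : 0 ≤ ((i : Nat) : Int) ∧ ((i : Nat) : Int) < (cs.length : Int) ∧
        PySem.Chars.isspace (cs.getD ((i : Nat) : Int).toNat ' ') = false := by
      refine ⟨by omega, by omega, ?_⟩
      rw [Int.toNat_natCast]; exact hns i hti (by omega)
    rw [gtiInner, if_pos hcond]
    have he : ((i : Nat) : Int) + 1 = ((i + 1 : Nat) : Int) := by push_cast; ring
    rw [he, ih (i + 1) _ _ f (by omega) (by omega) (by omega)]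
    simp only [Prod.mk.injEq]
    constructor <;> (split_ifs <;> omega)

-- A on a tokenless position: both loops exit at once
theorem portA_noToken (text : String) (at_ : Int) (hn : text.toList ≠ [])
    (hP : ¬(0 ≤ at_ ∧ at_ < (text.toList.length : Int) ∧
            PySem.Chars.isspace (text.toList.getD at_.toNat ' ') = false)) :
    get_token_interval text at_ = (at_, at_) := by
  have hlen : 1 ≤ text.toList.length := by
    cases h : text.toList with
    | nil => exact absurd h hn
    | cons _ _ => simp
  rw [get_token_interval]
  rw [gtiInner_exit _ _ _ _ _ _ hP]
  dsimp only
  rw [gtiInner_exit _ _ _ _ _ _ hP]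
  dsimp only
  rw [if_neg (by omega)]

-- A on a position inside the token [a, b)
theorem portA_token (text : String) (t a b : Nat)
    (htn : t < text.toList.length)
    (ha1 : a ≤ t) (ha2 : ∀ j, a ≤ j → j ≤ t → gtiWs text.toList j = false)
    (ha3 : a = 0 ∨ gtiWs text.toList (a - 1) = true)
    (hb1 : t < b) (hb2 : b ≤ text.toList.length)
    (hb3 : ∀ j, t ≤ j → j < b → gtiWs text.toList j = false)
    (hb4 : b = text.toList.length ∨ gtiWs text.toList b = true) :
    get_token_interval text (t : Int) = ((a : Int), (b : Int)) := by
  have hdown := gtiInner_down text.toList a t ha3 htn ha2 (t - a)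
    (text.toList.length : Int) 0 (text.toList.length + 1) (by omega) (by omega)
  rw [show a + (t - a) = t by omega] at hdown
  have hup := gtiInner_up text.toList t b hb4 hb2 hb3 (b - 1 - t) t
    (min (text.toList.length : Int) (a : Int)) (max 0 (t : Int)) (text.toList.length + 1)
    (by omega) (le_refl _) (by omega)
  rw [get_token_interval, hdown]
  dsimp only
  rw [hup]
  dsimp only
  rw [if_pos (by omega)]
  simp only [Prod.mk.injEq]
  constructor <;> omega

-- ---- B-side: the forward scan ----

-- no token at at_: the scan never fires a return and falls through to (at_, at_)
theorem gtiScan_noToken (cs : List Char) (at_ : Int)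
    (hP : ¬(0 ≤ at_ ∧ at_ < (cs.length : Int) ∧ gtiWs cs at_.toNat = false)) :
    ∀ rest : List Char, ∀ i : Nat, ∀ s : Option Nat, cs.drop i = rest →
      (∀ st, s = some st → ∀ j, st ≤ j → j < i → gtiWs cs j = false) →
      gtiScan at_ cs.length rest i s = (at_, at_) := by
  intro rest
  induction rest with
  | nil =>
    intro i s hdrop hinv
    have hni : cs.length ≤ i := by
      by_contra h
      rw [List.drop_eq_nil_iff] at hdrop; omega
    cases s with
    | none => rfl
    | some st =>
      rw [gtiScan, if_neg]
      intro ⟨h1, h2⟩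
      exact hP ⟨by omega, h2, by
        refine hinv st rfl at_.toNat (by omega) (by omega)⟩
  | cons c rest ih =>
    intro i s hdrop hinv
    have hc : cs.getD i ' ' = c := gti_getD_of_drop_cons hdrop
    have hd : cs.drop (i + 1) = rest := gti_drop_succ hdrop
    have hlt : i < cs.length := gti_lt_of_drop_cons hdrop
    by_cases hws : PySem.Chars.isspace c
    · cases s with
      | none =>
        rw [gtiScan, if_pos hws]
        exact ih (i + 1) none hd (by intro st h; cases h)
      | some st =>
        rw [gtiScan, if_pos hws, if_neg]
        · exact ih (i + 1) none hd (by intro st h; cases h)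
        · intro ⟨h1, h2⟩
          exact hP ⟨by omega, by omega, by
            refine hinv st rfl at_.toNat (by omega) (by omega)⟩
    · have hws' : gtiWs cs i = false := by rw [gtiWs, hc]; simpa using hws
      cases s with
      | none =>
        rw [gtiScan, if_neg hws]
        refine ih (i + 1) (some i) hd ?_
        intro st h j h1 h2
        cases h
        have : j = i := by omega
        subst this; exact hws'
      | some st =>
        rw [gtiScan, if_neg hws]
        refine ih (i + 1) (some st) hd ?_
        intro st' h j h1 h2
        cases h
        rcases Nat.lt_or_ge j i with h | h
        · exact hinv st rfl j h1 h
        · have : j = i := by omega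
          subst this; exact hws'

-- before the token start a, the scan state is irrelevant: it arrives at (a, none)
theorem gtiScan_pre (cs : List Char) (at_ : Int) (t a : Nat)
    (hat : at_ = (t : Int)) (htn : t < cs.length) (ha1 : a ≤ t)
    (ha3 : a = 0 ∨ gtiWs cs (a - 1) = true) :
    ∀ rest : List Char, ∀ i : Nat, ∀ s : Option Nat, cs.drop i = rest → i < a →
      gtiScan at_ cs.length rest i s = gtiScan at_ cs.length (cs.drop a) a none := by
  intro rest
  induction rest with
  | nil =>
    intro i s hdrop hia
    rw [List.drop_eq_nil_iff] at hdrop; omega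
  | cons c rest ih =>
    intro i s hdrop hia
    have hc : cs.getD i ' ' = c := gti_getD_of_drop_cons hdrop
    have hd : cs.drop (i + 1) = rest := gti_drop_succ hdrop
    by_cases hws : PySem.Chars.isspace c
    · have hnext : ∀ s' : Option Nat, gtiScan at_ cs.length rest (i + 1) s'
          = gtiScan at_ cs.length rest (i + 1) s' := fun _ => rfl
      have step : gtiScan at_ cs.length (c :: rest) i s = gtiScan at_ cs.length rest (i + 1) none := by
        cases s with
        | none => rw [gtiScan, if_pos hws]
        | some st =>
          rw [gtiScan, if_pos hws, if_neg]
          intro ⟨_, h2⟩; omega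
      rw [step]
      rcases Nat.lt_or_ge (i + 1) a with h | h
      · exact ih (i + 1) none hd h
      · have : i + 1 = a := by omega
        subst this
        rw [hd]
    · have hws' : gtiWs cs i = false := by rw [gtiWs, hc]; simpa using hws
      have hia' : i + 1 < a := by
        rcases Nat.lt_or_ge (i + 1) a with h | h
        · exact h
        · exfalso
          have : i + 1 = a := by omega
          rcases ha3 with h0 | hws2
          · omega
          · rw [← this] at hws2
            simp only [Nat.add_sub_cancel] at hws2
            rw [hws'] at hws2; cases hws2
      cases s with
      | none =>
        rw [gtiScan, if_neg hws]
        exact ih (i + 1) (some i) hd hia'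
      | some st =>
        rw [gtiScan, if_neg hws]
        exact ih (i + 1) (some st) hd hia'

-- inside the token with the open run (some a), the scan closes it at b and returns (a, b)
theorem gtiScan_run_aux (cs : List Char) (at_ : Int) (t a b : Nat)
    (hat : at_ = (t : Int)) (ha1 : a ≤ t)
    (ha2 : ∀ j, a ≤ j → j ≤ t → gtiWs cs j = false)
    (hb1 : t < b) (hb2 : b ≤ cs.length)
    (hb3 : ∀ j, t ≤ j → j < b → gtiWs cs j = false)
    (hb4 : b = cs.length ∨ gtiWs cs b = true) :
    ∀ rest : List Char, ∀ i : Nat, cs.drop i = rest → a < i → i ≤ b →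
      gtiScan at_ cs.length rest i (some a) = ((a : Int), (b : Int)) := by
  intro rest
  induction rest with
  | nil =>
    intro i hdrop hai hib
    rw [List.drop_eq_nil_iff] at hdrop
    have hb : b = cs.length := by omega
    rw [gtiScan, if_pos (by constructor <;> omega)]
    rw [hb]
  | cons c rest ih =>
    intro i hdrop hai hib
    have hc : cs.getD i ' ' = c := gti_getD_of_drop_cons hdrop
    have hd : cs.drop (i + 1) = rest := gti_drop_succ hdrop
    have hlt : i < cs.length := gti_lt_of_drop_cons hdrop
    rcases Nat.lt_or_ge i b with hib' | hib'
    · have hws' : gtiWs cs i = false := by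
        rcases Nat.lt_or_ge i (t + 1) with h | h
        · exact ha2 i (by omega) (by omega)
        · exact hb3 i (by omega) hib'
      have hws : ¬ PySem.Chars.isspace c := by
        rw [gtiWs, hc] at hws'; simp [hws']
      rw [gtiScan, if_neg hws]
      exact ih (i + 1) hd (by omega) (by omega)
    · have hib'' : i = b := by omega
      subst hib''
      have hws2 : gtiWs cs i = true := by
        rcases hb4 with h0 | h
        · omega
        · exact h
      have hws : PySem.Chars.isspace c := by
        rw [gtiWs, hc] at hws2; exact hws2
      rw [gtiScan, if_pos hws, if_pos (by constructor <;> omega)]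

-- entering the token at i = a
theorem gtiScan_run (cs : List Char) (at_ : Int) (t a b : Nat)
    (hat : at_ = (t : Int)) (htn : t < cs.length) (ha1 : a ≤ t)
    (ha2 : ∀ j, a ≤ j → j ≤ t → gtiWs cs j = false)
    (hb1 : t < b) (hb2 : b ≤ cs.length)
    (hb3 : ∀ j, t ≤ j → j < b → gtiWs cs j = false)
    (hb4 : b = cs.length ∨ gtiWs cs b = true) :
    gtiScan at_ cs.length (cs.drop a) a none = ((a : Int), (b : Int)) := by
  have han : a < cs.length := by omega
  obtain ⟨c, rest, hdrop⟩ : ∃ c rest, cs.drop a = c :: rest := by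
    cases h : cs.drop a with
    | nil => rw [List.drop_eq_nil_iff] at h; omega
    | cons c rest => exact ⟨c, rest, rfl⟩
  have hc : cs.getD a ' ' = c := gti_getD_of_drop_cons hdrop
  have hd : cs.drop (a + 1) = rest := gti_drop_succ hdrop
  have hws' : gtiWs cs a = false := ha2 a (le_refl _) ha1
  have hws : ¬ PySem.Chars.isspace c := by rw [gtiWs, hc] at hws'; simp [hws']
  rw [hdrop, gtiScan, if_neg hws]
  exact gtiScan_run_aux cs at_ t a b hat ha1 ha2 hb1 hb2 hb3 hb4 rest (a + 1) hd (by omega) (by omega)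

-- ===== VERDICT (by name: the statement is the Claim_ definition above) =====
theorem get_token_interval_spec : Claim_unchanged_get_token_interval := by
  intro text at_ _hdom
  unfold Spec_get_token_interval D_get_token_interval
  intro hD
  have hn : text.toList ≠ [] := by
    intro h
    exact hD (String.toList_eq_nil_iff.mp h)
  rw [get_token_interval_alt]
  by_cases hP : 0 ≤ at_ ∧ at_ < (text.toList.length : Int) ∧ gtiWs text.toList at_.toNat = false
  · obtain ⟨h1, h2, h3⟩ := hP
    set cs := text.toList with hcs
    set t := at_.toNat with hts
    have hat : at_ = (t : Int) := by omega
    have htn : t < cs.length := by omega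
    obtain ⟨a, ha1, ha2, ha3⟩ := gti_runStart cs t h3
    obtain ⟨b, hb1, hb2, hb3, hb4⟩ := gti_runEnd cs t h3 htn
    rw [hat, portA_token text t a b htn ha1 ha2 ha3 hb1 hb2 hb3 hb4]
    rcases Nat.eq_zero_or_pos a with h0 | hpos
    · subst h0
      rw [show gtiScan ((t : Nat) : Int) cs.length cs 0 none
            = gtiScan ((t : Nat) : Int) cs.length (cs.drop 0) 0 none by rw [List.drop_zero]]
      rw [gtiScan_run cs ((t : Nat) : Int) t 0 b rfl htn ha1 ha2 hb1 hb2 hb3 hb4]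
    · rw [gtiScan_pre cs ((t : Nat) : Int) t a rfl htn ha1 ha3 cs 0 none List.drop_zero (by omega)]
      rw [gtiScan_run cs ((t : Nat) : Int) t a b rfl htn ha1 ha2 hb1 hb2 hb3 hb4]
  · rw [portA_noToken text at_ hn (by rw [gtiWs] at hP; exact hP)]
    rw [gtiScan_noToken text.toList at_ hP text.toList 0 none List.drop_zero
        (by intro st h; cases h)]

theorem get_token_interval_changed : Claim_changed_get_token_interval := by
  unfold Claim_changed_get_token_interval; decide

theorem get_token_interval_tight : Claim_exact_get_token_interval := by
  intro text at_ _hdom hD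
  unfold D_get_token_interval at hD
  subst hD
  have h0 : ("" : String).toList = ([] : List Char) := rfl
  have hinner : ∀ step start end_ : Int, gtiInner [] step 1 at_ start end_ = (start, end_) := by
    intro step start end_
    rw [gtiInner, if_neg]
    intro ⟨h1, h2, _⟩
    simp at h2
    omega
  have hA : get_token_interval "" at_ = (0, 1) := by
    rw [get_token_interval, h0]
    simp only [List.length_nil, Nat.zero_add, Nat.cast_zero]
    rw [hinner]
    dsimp only
    rw [hinner]
    dsimp only
    norm_num
  have hB : get_token_interval_alt "" at_ = (at_, at_) := rfl
  rw [hA, hB]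
  intro h
  rw [Prod.mk.injEq] at h
  omega
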